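-- pv_equiv track=rewrite | github.com/Shipra8891/Python_Practice | pythonLearning/Interview_Program/positive_negative.py | check_negative_occurence
-- ===== SOURCE A (Python) =====
-- def check_negative_occurence(abc):
--     if len(abc) < 2:
--         return False
--     l2 = set(abc)
--     for i in l2:
--         if -i in l2:
--             return True
--
--     return False
-- ===== SOURCE B (Python) =====
-- def check_negative_occurence(abc):
--     if len(abc) < 2:
--         return False
--     vals = sorted(set(abc))
--     if 0 in vals:
--         return True
--     l, r = 0, len(vals) - 1
--     while l < r:
--         s = vals[l] + vals[r]
--         if s == 0:
--             return True
--         if s < 0: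
--             l += 1
--         else:
--             r -= 1
--     return False
-- ===== Notes on version B (the rewrite author's own statement) =====
-- stated objective: alternative
-- what changed: Replaces the hash-set scan (for each distinct value, test whether its negation is a member) by sorting the distinct values and running an ordered two-pointer sweep for a zero-sum pair, with an explicit branch for 0 (which pairs with itself).
import Mathlib
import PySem

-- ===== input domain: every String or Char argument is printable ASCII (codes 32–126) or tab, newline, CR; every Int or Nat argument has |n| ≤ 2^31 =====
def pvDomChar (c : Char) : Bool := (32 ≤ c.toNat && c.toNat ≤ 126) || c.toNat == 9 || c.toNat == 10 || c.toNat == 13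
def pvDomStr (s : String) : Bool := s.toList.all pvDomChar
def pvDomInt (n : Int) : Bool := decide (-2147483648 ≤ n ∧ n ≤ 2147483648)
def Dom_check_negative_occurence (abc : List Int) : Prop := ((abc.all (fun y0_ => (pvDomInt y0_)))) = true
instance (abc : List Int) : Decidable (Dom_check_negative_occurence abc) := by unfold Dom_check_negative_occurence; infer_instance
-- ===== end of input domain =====

-- B replaces A's set-membership scan by sort-unique + an ordered two-pointer sweep (alternative algorithm, same cost class).

-- ===== PORT A =====
-- the 'for i in l2: if -i in l2: return True' loop, early return = stop at first hit
def pvLoopA (l2 : PySem.Set Int) : List Int → Bool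
  | [] => false
  | i :: rest => if PySem.Set.contains l2 (-i) then true else pvLoopA l2 rest

def check_negative_occurence (abc : List Int) : Bool :=
  if abc.length < 2 then false
  else
    let l2 := PySem.Set.ofList abc
    pvLoopA l2 l2

-- ===== PORT B =====
-- the 'while l < r' two-pointer loop of Source B; indices always in range, getD 0 is exact there
def pvTwo (vals : List Int) (l r : Nat) : Bool :=
  if h : l < r then
    let s := vals.getD l 0 + vals.getD r 0
    if s = 0 then true
    else if s < 0 then pvTwo vals (l + 1) r
    else pvTwo vals l (r - 1)
  else false
  termination_by r - l
  decreasing_by all_goals omega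

def check_negative_occurence_alt (abc : List Int) : Bool :=
  if abc.length < 2 then false
  else
    let vals := PySem.List.sorted (PySem.Set.ofList abc) (fun x => x) false
    if vals.contains 0 then true
    else pvTwo vals 0 (vals.length - 1)

-- ===== PRECONDITION & SPEC =====
def Spec_check_negative_occurence (abc : List Int) (out : Bool) : Prop := out = check_negative_occurence_alt abc
instance (abc : List Int) (out : Bool) : Decidable (Spec_check_negative_occurence abc out) := by unfold Spec_check_negative_occurence; infer_instance

-- ===== CLAIM (what is proved, stated in full; the proofs are below) =====
def Claim_equal_check_negative_occurence : Prop := ∀ (abc : List Int), Dom_check_negative_occurence abc → Spec_check_negative_occurence abc (check_negative_occurence abc)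

-- ===== LEMMAS AND PROOFS =====

theorem pvLoopA_true_iff (l2 : PySem.Set Int) (l : List Int) :
    pvLoopA l2 l = true ↔ ∃ i ∈ l, (-i) ∈ l2 := by
  induction l with
  | nil => simp [pvLoopA]
  | cons i rest ih =>
    cases hc : PySem.Set.contains l2 (-i) with
    | true =>
      simp only [pvLoopA, hc, if_pos]
      exact ⟨fun _ => ⟨i, List.mem_cons_self, (PySem.Set.contains_iff l2 (-i)).mp hc⟩, fun _ => by trivial⟩
    | false =>
      simp only [pvLoopA, hc, Bool.false_eq_true, if_false, ih]
      constructor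
      · rintro ⟨j, hj, hmem⟩; exact ⟨j, List.mem_cons_of_mem _ hj, hmem⟩
      · rintro ⟨j, hj, hmem⟩
        rcases List.mem_cons.mp hj with rfl | hj
        · rw [(PySem.Set.contains_iff l2 (-j)).mpr hmem] at hc; cases hc
        · exact ⟨j, hj, hmem⟩

theorem portA_true_iff (abc : List Int) :
    check_negative_occurence abc = true ↔ 2 ≤ abc.length ∧ ∃ x ∈ abc, (-x) ∈ abc := by
  unfold check_negative_occurence
  by_cases h : abc.length < 2
  · simp [h]
  · simp only [h, if_false, pvLoopA_true_iff, PySem.Set.mem_ofList]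
    constructor
    · rintro ⟨x, hx, hnx⟩; exact ⟨by omega, x, hx, hnx⟩
    · rintro ⟨_, x, hx, hnx⟩; exact ⟨x, hx, hnx⟩

-- two-pointer correctness on a (weakly) sorted list
theorem pvTwo_true_iff (vals : List Int)
    (hs : vals.Pairwise (· ≤ ·)) :
    ∀ l r, r < vals.length →
      (pvTwo vals l r = true ↔
        ∃ i j, l ≤ i ∧ i < j ∧ j ≤ r ∧ vals.getD i 0 + vals.getD j 0 = 0) := by
  have mono : ∀ p q, p ≤ q → q < vals.length → vals.getD p 0 ≤ vals.getD q 0 := by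
    intro p q hpq hq
    rcases Nat.eq_or_lt_of_le hpq with rfl | hlt
    · exact le_refl _
    · have hp : p < vals.length := lt_trans hlt hq
      have h2 := (List.pairwise_iff_getElem.mp hs) p q hp hq hlt
      rw [List.getD_eq_getElem _ _ hp, List.getD_eq_getElem _ _ hq]
      exact h2
  intro l r hr
  induction hfuel : r - l using Nat.strong_induction_on generalizing l r with
  | _ fuel ih =>
  unfold pvTwo
  by_cases h : l < r
  · simp only [h, dif_pos]
    set s := vals.getD l 0 + vals.getD r 0 with hsdef
    by_cases h0 : s = 0
    · rw [if_pos h0]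
      constructor
      · intro _; exact ⟨l, r, le_refl _, h, le_refl _, h0⟩
      · intro _; trivial
    · rw [if_neg h0]
      by_cases hneg : s < 0
      · rw [if_pos hneg]
        rw [ih (r - (l+1)) (by omega) (l+1) r hr rfl]
        constructor
        · rintro ⟨i, j, hli, hij, hjr, hz⟩; exact ⟨i, j, by omega, hij, hjr, hz⟩
        · rintro ⟨i, j, hli, hij, hjr, hz⟩
          refine ⟨i, j, ?_, hij, hjr, hz⟩
          by_contra hcon
          have hi : i = l := by omega
          subst hi
          have : vals.getD j 0 ≤ vals.getD r 0 := mono j r hjr hr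
          omega
      · rw [if_neg hneg]
        have hrlen : r - 1 < vals.length := by omega
        rw [ih (r - 1 - l) (by omega) l (r-1) hrlen rfl]
        constructor
        · rintro ⟨i, j, hli, hij, hjr, hz⟩; exact ⟨i, j, hli, hij, by omega, hz⟩
        · rintro ⟨i, j, hli, hij, hjr, hz⟩
          refine ⟨i, j, hli, hij, ?_, hz⟩
          by_contra hcon
          have hj : j = r := by omega
          subst hj
          have : vals.getD l 0 ≤ vals.getD i 0 := mono l i hli (by omega)
          omega
  · rw [dif_neg h]
    simp only [Bool.false_eq_true, false_iff]
    rintro ⟨i, j, hli, hij, hjr, _⟩; omega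

theorem portB_true_iff (abc : List Int) :
    check_negative_occurence_alt abc = true ↔ 2 ≤ abc.length ∧ ∃ x ∈ abc, (-x) ∈ abc := by
  unfold check_negative_occurence_alt
  by_cases h : abc.length < 2
  · simp [h]
  · simp only [h, if_false]
    have hlen2 : 2 ≤ abc.length := by omega
    set vals := PySem.List.sorted (PySem.Set.ofList abc) (fun x => x) false with hv
    have hmem : ∀ x : Int, x ∈ vals ↔ x ∈ abc := by
      intro x; rw [hv, PySem.List.mem_sorted, PySem.Set.mem_ofList]
    have hpw : vals.Pairwise (· < ·) := PySem.List.sorted_ofList_pairwise_lt abc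
    have hpwle : vals.Pairwise (· ≤ ·) := hpw.imp (fun h => le_of_lt h)
    have hne : vals ≠ [] := by
      intro hnil
      have : abc = [] := by
        cases habc : abc with
        | nil => rfl
        | cons a t =>
          exfalso
          have : a ∈ vals := (hmem a).mpr (by simp [habc])
          simp [hnil] at this
      simp [this] at hlen2
    have hlenpos : 0 < vals.length := List.length_pos_iff.mpr hne
    by_cases h0 : vals.contains 0
    · simp only [h0, if_true]
      have h0m : (0 : Int) ∈ abc := (hmem 0).mp (by simpa using h0)
      constructor
      · intro _; exact ⟨hlen2, 0, h0m, by simpa using h0m⟩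
      · intro _; trivial
    · simp only [h0, Bool.false_eq_true, if_false]
      have h0nm : (0 : Int) ∉ vals := by simpa using h0
      rw [pvTwo_true_iff vals hpwle 0 (vals.length - 1) (by omega)]
      constructor
      · rintro ⟨i, j, _, hij, hjr, hz⟩
        have hjlt : j < vals.length := by omega
        have hilt : i < vals.length := by omega
        have hmi : vals.getD i 0 ∈ vals := by
          rw [List.getD_eq_getElem _ _ hilt]; exact List.getElem_mem hilt
        have hmj : vals.getD j 0 ∈ vals := by
          rw [List.getD_eq_getElem _ _ hjlt]; exact List.getElem_mem hjlt
        refine ⟨hlen2, vals.getD i 0, (hmem _).mp hmi, ?_⟩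
        have hEq : -(vals.getD i 0) = vals.getD j 0 := by omega
        rw [hEq]; exact (hmem _).mp hmj
      · rintro ⟨_, x, hx, hnx⟩
        have hxv : x ∈ vals := (hmem x).mpr hx
        have hnxv : (-x) ∈ vals := (hmem (-x)).mpr hnx
        have hx0 : x ≠ 0 := fun hq => h0nm (hq ▸ hxv)
        obtain ⟨i, hilt, hgi⟩ := List.getElem_of_mem hxv
        obtain ⟨j, hjlt, hgj⟩ := List.getElem_of_mem hnxv
        have hgi' : vals.getD i 0 = x := by
          rw [List.getD_eq_getElem _ _ hilt]; exact hgi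
        have hgj' : vals.getD j 0 = -x := by
          rw [List.getD_eq_getElem _ _ hjlt]; exact hgj
        have hij : i ≠ j := by intro hEq; subst hEq; omega
        rcases Nat.lt_or_ge i j with hlt | hge
        · exact ⟨i, j, Nat.zero_le _, hlt, by omega, by omega⟩
        · exact ⟨j, i, Nat.zero_le _, by omega, by omega, by omega⟩

-- ===== VERDICT (by name: the statement is the Claim_ definition above) =====
theorem check_negative_occurence_spec : Claim_equal_check_negative_occurence := by
  intro abc _
  unfold Spec_check_negative_occurence
  by_cases hA : check_negative_occurence abc = true
  · have := (portB_true_iff abc).mpr ((portA_true_iff abc).mp hA)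
    rw [hA, this]
  · have hB : check_negative_occurence_alt abc ≠ true := fun hB =>
      hA ((portA_true_iff abc).mpr ((portB_true_iff abc).mp hB))
    simp only [Bool.not_eq_true] at hA hB
    rw [hA, hB]
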